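-- pv_equiv track=rewrite | github.com/Vcaudill/Sim | Individual_based_sim.py | icount
-- ===== SOURCE A (Python) =====
-- def icount(newgeneration):
--     count0 = 0
--     count1 = 0
--     for i in newgeneration:
--         if newgeneration[i] == [0, 0]:
--             count0 = count0 + 2
--         if newgeneration[i] == [0, 1] or newgeneration[i] == [1, 0]:
--             count0 = count0 + 1
--             count1 = count1 + 1
--         if newgeneration[i] == [1, 1]:
--             count1 = count1 + 2
--     return count0, count1
-- ===== SOURCE B (Python) =====
-- def icount(newgeneration):
--     vals = list(newgeneration.values())
--     het = vals.count([0, 1]) + vals.count([1, 0])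
--     return 2 * vals.count([0, 0]) + het, 2 * vals.count([1, 1]) + het
-- ===== Notes on version B (the rewrite author's own statement) =====
-- stated objective: simpler
-- what changed: Replaces the key-iterating branching accumulator loop (with a dict lookup per key) with direct pattern-frequency arithmetic over the values list via list.count scans.
import Mathlib
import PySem

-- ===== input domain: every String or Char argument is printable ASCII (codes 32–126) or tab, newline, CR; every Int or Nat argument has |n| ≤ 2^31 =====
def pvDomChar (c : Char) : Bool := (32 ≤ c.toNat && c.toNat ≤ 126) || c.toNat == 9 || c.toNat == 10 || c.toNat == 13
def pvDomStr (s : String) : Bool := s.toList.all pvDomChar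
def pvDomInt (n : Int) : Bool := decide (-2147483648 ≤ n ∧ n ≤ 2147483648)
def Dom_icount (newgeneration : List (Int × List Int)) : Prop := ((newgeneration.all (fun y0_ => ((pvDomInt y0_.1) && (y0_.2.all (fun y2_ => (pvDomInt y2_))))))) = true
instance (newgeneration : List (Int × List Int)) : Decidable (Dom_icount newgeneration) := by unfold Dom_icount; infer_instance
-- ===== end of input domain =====

-- B replaces A's key-iterating branching accumulator loop with direct arithmetic
-- over pattern frequencies of the values list (objective: simpler).

-- ===== PORT A =====
-- 'for i in newgeneration' iterates the dict's keys; each body step looks the key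
-- up in the dict ('newgeneration[i]'), which always succeeds, hence '.getD []'
-- is never the fallback on Pre_.
def icount (newgeneration : List (Int × List Int)) : Int × Int :=
  newgeneration.foldl (fun (acc : Int × Int) kv =>
    let v := ((PySem.Dict.mk newgeneration).get? kv.1).getD []
    let acc := if v = [0, 0] then (acc.1 + 2, acc.2) else acc
    let acc := if v = [0, 1] ∨ v = [1, 0] then (acc.1 + 1, acc.2 + 1) else acc
    if v = [1, 1] then (acc.1, acc.2 + 2) else acc) ((0 : Int), (0 : Int))

-- ===== PORT B =====
def icount_alt (newgeneration : List (Int × List Int)) : Int × Int :=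
  let vals := newgeneration.map Prod.snd
  let het : Int := (vals.count [0, 1] : Int) + (vals.count [1, 0] : Int)
  (2 * (vals.count [0, 0] : Int) + het, 2 * (vals.count [1, 1] : Int) + het)

-- ===== PRECONDITION & SPEC =====
-- Pre_ excludes duplicate keys, which a Python dict (the actual argument type) cannot contain.
def Pre_icount (newgeneration : List (Int × List Int)) : Prop :=
  (newgeneration.map Prod.fst).Nodup
instance (newgeneration : List (Int × List Int)) : Decidable (Pre_icount newgeneration) := by unfold Pre_icount; infer_instance
def pvWitness_icount : (List (Int × List Int)) := [(1, [0, 0]), (2, [0, 1]), (3, [1, 1])]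
def Spec_icount (newgeneration : List (Int × List Int)) (out : Int × Int) : Prop := out = icount_alt newgeneration
instance (newgeneration : List (Int × List Int)) (out : Int × Int) : Decidable (Spec_icount newgeneration out) := by unfold Spec_icount; infer_instance

-- ===== CLAIM (what is proved, stated in full; the proofs are below) =====
def Claim_equal_icount : Prop := ∀ (newgeneration : List (Int × List Int)), Dom_icount newgeneration → Pre_icount newgeneration → Spec_icount newgeneration (icount newgeneration)

-- ===== LEMMAS AND PROOFS =====

-- with distinct keys, the per-key lookup of A's loop returns that pair's own value
theorem lookup_self (l : List (Int × List Int)) (h : (l.map Prod.fst).Nodup)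
    (kv : Int × List Int) (hm : kv ∈ l) :
    ((PySem.Dict.mk l).get? kv.1).getD [] = kv.2 := by
  induction l with
  | nil => cases hm
  | cons hd tl ih =>
    simp only [List.map_cons, List.nodup_cons] at h
    obtain ⟨k, v⟩ := hd
    rcases List.mem_cons.mp hm with rfl | hm'
    · simp [PySem.Dict.get?_mk_cons]
    · rw [PySem.Dict.get?_mk_cons]
      have : (k == kv.1) = false := by
        simp only [beq_eq_false_iff_ne, ne_eq]
        intro he
        exact h.1 (by rw [he]; exact List.mem_map.mpr ⟨kv, hm', rfl⟩)
      simp only [this, Bool.false_eq_true, if_false]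
      exact ih h.2 hm'

-- the pair-level fold over the values computes the count formula
theorem fold_counts (l : List (Int × List Int)) (c0 c1 : Int) :
    l.foldl (fun (acc : Int × Int) kv =>
      let v := kv.2
      let acc := if v = [0, 0] then (acc.1 + 2, acc.2) else acc
      let acc := if v = [0, 1] ∨ v = [1, 0] then (acc.1 + 1, acc.2 + 1) else acc
      if v = [1, 1] then (acc.1, acc.2 + 2) else acc) (c0, c1)
    = (c0 + 2 * ((l.map Prod.snd).count [0, 0] : Int) + ((l.map Prod.snd).count [0, 1] : Int) + ((l.map Prod.snd).count [1, 0] : Int),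
       c1 + ((l.map Prod.snd).count [0, 1] : Int) + ((l.map Prod.snd).count [1, 0] : Int) + 2 * ((l.map Prod.snd).count [1, 1] : Int)) := by
  induction l generalizing c0 c1 with
  | nil => simp
  | cons kv tl ih =>
    simp only [List.foldl_cons, List.map_cons, List.count_cons]
    by_cases h00 : kv.2 = [0, 0] <;> by_cases h01 : kv.2 = [0, 1] <;> by_cases h10 : kv.2 = [1, 0] <;>
      by_cases h11 : kv.2 = [1, 1] <;>
      simp_all [ih]
    all_goals omega

-- ===== VERDICT (by name: the statement is the Claim_ definition above) =====
theorem icount_spec : Claim_equal_icount := by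
  intro l _ hpre
  unfold Spec_icount icount icount_alt
  have h1 := PySem.List.foldl_congr_mem (l := l) (init := ((0 : Int), (0 : Int)))
    (f := fun (acc : Int × Int) kv =>
      let v := ((PySem.Dict.mk l).get? kv.1).getD []
      let acc := if v = [0, 0] then (acc.1 + 2, acc.2) else acc
      let acc := if v = [0, 1] ∨ v = [1, 0] then (acc.1 + 1, acc.2 + 1) else acc
      if v = [1, 1] then (acc.1, acc.2 + 2) else acc)
    (g := fun (acc : Int × Int) kv =>
      let v := kv.2
      let acc := if v = [0, 0] then (acc.1 + 2, acc.2) else acc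
      let acc := if v = [0, 1] ∨ v = [1, 0] then (acc.1 + 1, acc.2 + 1) else acc
      if v = [1, 1] then (acc.1, acc.2 + 2) else acc)
    (fun acc kv hm => by simp only [lookup_self l hpre kv hm])
  rw [h1, fold_counts]
  rw [Prod.mk.injEq]
  exact ⟨by ring, by ring⟩
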